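-- pv_equiv track=rewrite | github.com/NamNguyenHuu/src | functional_test/scripts/build_process/build_burn_preparing_helpers.py | collect_data_cfgs_from_total_list
-- ===== SOURCE A (Python) =====
-- def collect_data_cfgs_from_total_list(modified_test_define, build_total_list):
--     diff = []
--     ##compare test_feature_list and total_feature_list to get cfg and tp
--     for value in range(len(build_total_list)):
--         match_found = False
--         for item in range(len(modified_test_define)):
--             if modified_test_define[item][0] == build_total_list[value][0]:
--                 if modified_test_define[item][1] == build_total_list[value][1]:
--                     add_data_to_build = build_total_list[value]
--                     match_found = True
--                     diff.append(add_data_to_build)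
--     extracted_test_tbl = diff
--     return extracted_test_tbl
-- ===== SOURCE B (Python) =====
-- def collect_data_cfgs_from_total_list(modified_test_define, build_total_list):
--     counts = {}
--     for row in modified_test_define:
--         key = tuple(row[:2])
--         counts[key] = counts.get(key, 0) + 1
--     extracted_test_tbl = []
--     for row in build_total_list:
--         extracted_test_tbl += [row] * counts.get(tuple(row[:2]), 0)
--     return extracted_test_tbl
-- ===== Notes on version B (the rewrite author's own statement) =====
-- stated objective: alternative
-- what changed: replaces the nested per-build-row scan of modified_test_define with a dict counting (row[0],row[1]) key-pair prefixes built once, then a single pass appending each build row count-many times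
import Mathlib
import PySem

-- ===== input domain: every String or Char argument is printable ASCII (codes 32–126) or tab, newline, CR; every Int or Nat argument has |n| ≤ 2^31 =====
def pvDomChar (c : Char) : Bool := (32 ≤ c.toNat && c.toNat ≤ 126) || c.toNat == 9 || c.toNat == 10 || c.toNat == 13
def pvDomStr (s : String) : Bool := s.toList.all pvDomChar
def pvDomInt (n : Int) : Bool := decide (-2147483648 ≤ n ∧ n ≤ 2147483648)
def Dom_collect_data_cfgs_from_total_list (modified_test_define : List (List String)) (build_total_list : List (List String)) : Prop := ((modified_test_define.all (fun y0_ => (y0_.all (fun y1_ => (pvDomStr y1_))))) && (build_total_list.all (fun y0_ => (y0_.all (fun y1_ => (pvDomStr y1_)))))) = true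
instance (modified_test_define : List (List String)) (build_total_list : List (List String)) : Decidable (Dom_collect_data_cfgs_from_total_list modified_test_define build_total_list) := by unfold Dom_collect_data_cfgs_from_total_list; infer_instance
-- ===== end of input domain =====

-- B replaces A's nested rescans of modified_test_define by a dict counting (row[0],row[1]) prefix pairs built once, then a single pass over build_total_list (objective: alternative algorithm).

-- ===== PORT A =====
-- literal port of A's two index loops; the local 'match_found' flag is written but never read, so it is not threaded through the fold
def collect_data_cfgs_from_total_list (modified_test_define : List (List String)) (build_total_list : List (List String)) : List (List String) :=
  let diff : List (List String) :=
    (PySem.List.pyRange 0 (PySem.List.len build_total_list) 1).foldl (fun diff value =>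
      (PySem.List.pyRange 0 (PySem.List.len modified_test_define) 1).foldl (fun diff item =>
        if PySem.List.pyGetD (PySem.List.pyGetD modified_test_define item []) 0 "" == PySem.List.pyGetD (PySem.List.pyGetD build_total_list value []) 0 "" then
          if PySem.List.pyGetD (PySem.List.pyGetD modified_test_define item []) 1 "" == PySem.List.pyGetD (PySem.List.pyGetD build_total_list value []) 1 "" then
            diff ++ [PySem.List.pyGetD build_total_list value []]
          else diff
        else diff) diff) []
  diff

-- ===== PORT B =====
def collect_data_cfgs_from_total_list_alt (modified_test_define : List (List String)) (build_total_list : List (List String)) : List (List String) :=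
  let counts : PySem.Dict (List String) Int :=
    modified_test_define.foldl (fun d row =>
      let key := PySem.List.slice row none (some 2)
      d.insert key (d.getD key 0 + 1)) PySem.Dict.empty
  build_total_list.foldl (fun out row =>
    out ++ PySem.List.pyRepeat [row] (counts.getD (PySem.List.slice row none (some 2)) 0)) []

-- ===== PRECONDITION & SPEC =====
-- Pre_ excludes exactly the inputs where A raises IndexError: an empty row indexed by [0]
-- (any define row when build_total_list is nonempty, any build row when modified_test_define
-- is nonempty), or a pair of rows whose first entries match but one of them lacks a second entry.
def Pre_collect_data_cfgs_from_total_list (modified_test_define : List (List String)) (build_total_list : List (List String)) : Prop :=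
  (build_total_list ≠ [] → ∀ d ∈ modified_test_define, d ≠ []) ∧
  (modified_test_define ≠ [] → ∀ b ∈ build_total_list, b ≠ []) ∧
  (∀ d ∈ modified_test_define, ∀ b ∈ build_total_list,
    d.headD "" = b.headD "" → 2 ≤ d.length ∧ 2 ≤ b.length)
instance (modified_test_define : List (List String)) (build_total_list : List (List String)) : Decidable (Pre_collect_data_cfgs_from_total_list modified_test_define build_total_list) := by unfold Pre_collect_data_cfgs_from_total_list; infer_instance
def pvWitness_collect_data_cfgs_from_total_list : List (List String) × List (List String) :=
  ([["a", "1"], ["b", "2"], ["a", "1"]], [["a", "1"], ["c", "3"], ["b", "2"]])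

def Spec_collect_data_cfgs_from_total_list (modified_test_define : List (List String)) (build_total_list : List (List String)) (out : List (List String)) : Prop := out = collect_data_cfgs_from_total_list_alt modified_test_define build_total_list
instance (modified_test_define : List (List String)) (build_total_list : List (List String)) (out : List (List String)) : Decidable (Spec_collect_data_cfgs_from_total_list modified_test_define build_total_list out) := by unfold Spec_collect_data_cfgs_from_total_list; infer_instance

-- ===== CLAIM (what is proved, stated in full; the proofs are below) =====
def Claim_equal_collect_data_cfgs_from_total_list : Prop := ∀ (modified_test_define : List (List String)) (build_total_list : List (List String)), Dom_collect_data_cfgs_from_total_list modified_test_define build_total_list → Pre_collect_data_cfgs_from_total_list modified_test_define build_total_list → Spec_collect_data_cfgs_from_total_list modified_test_define build_total_list (collect_data_cfgs_from_total_list modified_test_define build_total_list)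

-- ===== LEMMAS AND PROOFS =====

-- Under Pre_, for nonempty rows d and b, A's pair of element tests agrees with
-- B's comparison of the two-element prefixes.
theorem pv_cond_eq (d b : List String)
    (hd : d ≠ []) (hb : b ≠ [])
    (h2 : d.headD "" = b.headD "" → 2 ≤ d.length ∧ 2 ≤ b.length) :
    ((PySem.List.pyGetD d 0 "" == PySem.List.pyGetD b 0 "") &&
     (PySem.List.pyGetD d 1 "" == PySem.List.pyGetD b 1 "")) =
    (PySem.List.slice d none (some 2) == PySem.List.slice b none (some 2)) := by
  match d, b with
  | [], _ => exact absurd rfl hd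
  | _ :: _, [] => exact absurd rfl hb
  | d0 :: d', b0 :: b' =>
    have hsl : ∀ (l : List String), PySem.List.slice l none (some 2) = l.take 2 := fun l => by
      have := PySem.List.slice_to_natCast (xs := l) (b := 2)
      simpa using this
    rw [hsl, hsl]
    by_cases h0 : d0 = b0
    · subst h0
      obtain ⟨hld, hlb⟩ := h2 rfl
      match d', b' with
      | [], _ => simp at hld
      | _ :: _, [] => simp at hlb
      | d1 :: d'', b1 :: b'' =>
        simp [PySem.List.pyGetD_of_nonneg, List.take]
    · have h0' : (d0 == b0) = false := by simp [h0]
      simp [PySem.List.pyGetD_of_nonneg, List.take, h0']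

-- B's counting loop: the dict entry for b's prefix is the number of define rows sharing it.
theorem pv_counts_getD (md : List (List String)) (c : PySem.Dict (List String) Int) (b : List String) :
    ((md.foldl (fun d row =>
        d.insert (PySem.List.slice row none (some 2))
          (d.getD (PySem.List.slice row none (some 2)) 0 + 1)) c).getD
      (PySem.List.slice b none (some 2)) 0)
    = c.getD (PySem.List.slice b none (some 2)) 0
      + (md.countP (fun d => PySem.List.slice d none (some 2) == PySem.List.slice b none (some 2)) : Int) := by
  induction md generalizing c with
  | nil => simp
  | cons r md ih =>
    rw [List.foldl_cons, ih, List.countP_cons]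
    by_cases h : PySem.List.slice r none (some 2) = PySem.List.slice b none (some 2)
    · rw [h, PySem.Dict.getD_insert_self]
      simp
      ring
    · rw [PySem.Dict.getD_insert_of_ne]
      · simp [h]
      · exact fun he => h he.symm

theorem collect_spec_aux (md bt : List (List String))
    (hpre : Pre_collect_data_cfgs_from_total_list md bt) :
    collect_data_cfgs_from_total_list md bt = collect_data_cfgs_from_total_list_alt md bt := by
  obtain ⟨h1, h2, h3⟩ := hpre
  unfold collect_data_cfgs_from_total_list collect_data_cfgs_from_total_list_alt
  simp only [PySem.List.len_eq]
  rw [PySem.List.foldl_pyRange_zero_pyGetD' bt []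
    (fun diff b =>
      (PySem.List.pyRange 0 (md.length : Int) 1).foldl (fun diff item =>
        if PySem.List.pyGetD (PySem.List.pyGetD md item []) 0 "" == PySem.List.pyGetD b 0 "" then
          if PySem.List.pyGetD (PySem.List.pyGetD md item []) 1 "" == PySem.List.pyGetD b 1 "" then
            diff ++ [b]
          else diff
        else diff) diff) []]
  apply PySem.List.foldl_congr_mem
  intro diff b hbmem
  have hbtne : bt ≠ [] := List.ne_nil_of_mem hbmem
  rw [PySem.List.foldl_pyRange_zero_pyGetD' md []
    (fun diff d =>
      if PySem.List.pyGetD d 0 "" == PySem.List.pyGetD b 0 "" then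
        if PySem.List.pyGetD d 1 "" == PySem.List.pyGetD b 1 "" then diff ++ [b]
        else diff
      else diff) diff]
  rw [pv_counts_getD, PySem.List.pyRepeat_singleton]
  have hstep : md.foldl (fun diff d =>
      if PySem.List.pyGetD d 0 "" == PySem.List.pyGetD b 0 "" then
        if PySem.List.pyGetD d 1 "" == PySem.List.pyGetD b 1 "" then diff ++ [b]
        else diff
      else diff) diff
      = md.foldl (fun diff d =>
        if PySem.List.slice d none (some 2) == PySem.List.slice b none (some 2) then diff ++ [b]
        else diff) diff := by
    apply PySem.List.foldl_congr_mem
    intro acc d hdmem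
    have hd : d ≠ [] := h1 hbtne d hdmem
    have hb : b ≠ [] := h2 (List.ne_nil_of_mem hdmem) b hbmem
    have hc := pv_cond_eq d b hd hb (h3 d hdmem b hbmem)
    cases hA : (PySem.List.pyGetD d 0 "" == PySem.List.pyGetD b 0 "") <;>
      cases hB : (PySem.List.pyGetD d 1 "" == PySem.List.pyGetD b 1 "") <;>
      rw [hA, hB] at hc <;> simp at hc <;> simp [hc]
  rw [hstep, PySem.List.foldl_append_if
    (p := fun d => PySem.List.slice d none (some 2) == PySem.List.slice b none (some 2))
    (f := fun _ => b)]
  congr 1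
  rw [List.map_const']
  simp [List.countP_eq_length_filter]

-- ===== VERDICT (by name: the statement is the Claim_ definition above) =====
theorem collect_data_cfgs_from_total_list_spec : Claim_equal_collect_data_cfgs_from_total_list := by
  intro md bt _ hpre
  exact collect_spec_aux md bt hpre
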